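-- pv_equiv track=rewrite | github.com/CJOWakefield/MyLeetcode | 1267_servers_that_can_communicate.py | countServers_II
-- ===== SOURCE A (Python) =====
-- from typing import List
--
-- def countServers_II(grid: List[List[int]]) -> int:
--     m, res = len(grid), 0
--     for row in range(m):
--         row_sum = sum(grid[row])
--         if row_sum > 1: res += row_sum
--         elif row_sum == 1:
--             column = grid[row].index(1)
--             if sum(grid[row][column] for row in range(m)) > 1: res += 1
--     return res
-- ===== SOURCE B (Python) =====
-- from typing import List
--
-- def countServers_II(grid: List[List[int]]) -> int:
--     cols = [sum(c) for c in zip(*grid)]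
--     res = 0
--     for r in grid:
--         s = sum(r)
--         if s > 1:
--             res += s
--         elif s == 1 and cols[r.index(1)] > 1:
--             res += 1
--     return res
-- ===== Notes on version B (the rewrite author's own statement) =====
-- stated objective: alternative
-- what changed: B builds all column sums once via zip(*grid) and looks them up, instead of A re-scanning the whole column (an extra inner pass over range(m) with indexing) for each row whose sum is 1.
import Mathlib
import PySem

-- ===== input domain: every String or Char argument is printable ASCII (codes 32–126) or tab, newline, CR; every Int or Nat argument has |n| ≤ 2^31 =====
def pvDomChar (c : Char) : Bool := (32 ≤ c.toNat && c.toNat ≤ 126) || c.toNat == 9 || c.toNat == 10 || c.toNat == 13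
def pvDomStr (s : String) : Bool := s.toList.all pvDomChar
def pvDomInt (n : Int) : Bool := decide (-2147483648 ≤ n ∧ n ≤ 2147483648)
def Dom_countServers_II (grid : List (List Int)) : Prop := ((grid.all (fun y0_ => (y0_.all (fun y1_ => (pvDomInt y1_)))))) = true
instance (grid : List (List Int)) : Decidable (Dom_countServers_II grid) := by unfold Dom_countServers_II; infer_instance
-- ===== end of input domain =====

-- B builds all column sums once from zip(*grid) and looks them up, instead of A's
-- per-qualifying-row column re-scan (objective: alternative).

-- ===== PORT A =====
-- literal port of A: loop over range(m); per row sum the row; on row_sum == 1 find the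
-- first 1 (.index) and re-sum that column over range(m)
def countServers_II (grid : List (List Int)) : Int :=
  (PySem.List.pyRange 0 (grid.length : Int) 1).foldl
    (fun res row =>
      if (PySem.List.pyGetD grid row []).sum > 1 then res + (PySem.List.pyGetD grid row []).sum
      else if (PySem.List.pyGetD grid row []).sum = 1 then
        if (PySem.List.pyRange 0 (grid.length : Int) 1).foldl
            (fun acc row2 => acc + PySem.List.pyGetD (PySem.List.pyGetD grid row2 [])
              (((PySem.List.index? (PySem.List.pyGetD grid row []) 1).getD 0 : Nat) : Int) 0) 0 > 1
        then res + 1 else res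
      else res) 0

-- ===== PORT B =====
-- literal port of B: cols = [sum(c) for c in zip(*grid)]; zip(*grid) is ported exactly as the
-- column tuples of index j for j < the minimum row length (Python's zip truncation), each summed
-- with List.sum; then one pass over the rows looking the needed column sum up in cols
def countServers_II_alt (grid : List (List Int)) : Int :=
  let w : Int := ((grid.map (fun r => (r.length : Int))).min?).getD 0
  let cols := (PySem.List.pyRange 0 w 1).map
    (fun j => (grid.map (fun row => PySem.List.pyGetD row j 0)).sum)
  grid.foldl
    (fun res r =>
      if r.sum > 1 then res + r.sum
      else if r.sum = 1 ∧
          PySem.List.pyGetD cols (((PySem.List.index? r 1).getD 0 : Nat) : Int) 0 > 1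
      then res + 1
      else res) 0

-- ===== PRECONDITION & SPEC =====
-- Pre_ excludes exactly the inputs on which A raises: a row summing to 1 with no literal 1 in it
-- (ValueError from .index), or whose first 1 sits at a column index some row is too short for (IndexError).
def Pre_countServers_II (grid : List (List Int)) : Prop :=
  ∀ r ∈ grid, r.sum = 1 → 1 ∈ r ∧ ∀ r2 ∈ grid, r.idxOf 1 < r2.length
instance (grid : List (List Int)) : Decidable (Pre_countServers_II grid) := by
  unfold Pre_countServers_II; infer_instance

def pvWitness_countServers_II : List (List Int) := [[1, 0], [1, 0], [0, 2]]

def Spec_countServers_II (grid : List (List Int)) (out : Int) : Prop := out = countServers_II_alt grid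
instance (grid : List (List Int)) (out : Int) : Decidable (Spec_countServers_II grid out) := by
  unfold Spec_countServers_II; infer_instance

-- ===== CLAIM (what is proved, stated in full; the proofs are below) =====
def Claim_equal_countServers_II : Prop :=
  ∀ (grid : List (List Int)), Dom_countServers_II grid → Pre_countServers_II grid →
    Spec_countServers_II grid (countServers_II grid)

-- ===== LEMMAS AND PROOFS =====

theorem pv_idxOf?_of_mem (r : List Int) (h : (1 : Int) ∈ r) :
    List.idxOf? 1 r = some (r.idxOf 1) := by
  cases hk : List.idxOf? 1 r with
  | none => simp [List.idxOf?_eq_none_iff] at hk; exact absurd h hk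
  | some k => rw [List.idxOf_eq_getD_idxOf?, hk]; rfl

theorem countServers_II_spec : Claim_equal_countServers_II := by
  intro grid _ hpre
  unfold Spec_countServers_II
  simp only [countServers_II, countServers_II_alt]
  rw [PySem.List.foldl_pyRange_zero_pyGetD' grid []
      (fun res r =>
        if r.sum > 1 then res + r.sum
        else if r.sum = 1 then
          if (PySem.List.pyRange 0 (grid.length : Int) 1).foldl
              (fun acc row2 => acc + PySem.List.pyGetD (PySem.List.pyGetD grid row2 [])
                (((PySem.List.index? r 1).getD 0 : Nat) : Int) 0) 0 > 1
          then res + 1 else res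
        else res) 0]
  apply PySem.List.foldl_congr_mem
  intro acc r hr
  by_cases h1 : r.sum > 1
  · simp only [if_pos h1]
  · simp only [if_neg h1]
    by_cases h2 : r.sum = 1
    · obtain ⟨hmem, hlen⟩ := hpre r hr h2
      -- the column index
      have hidx : PySem.List.index? r 1 = some (r.idxOf 1) := by
        rw [PySem.List.index?_eq_idxOf?]; exact pv_idxOf?_of_mem r hmem
      rw [PySem.List.foldl_pyRange_zero_pyGetD' grid []
          (fun acc2 r2 => acc2 + PySem.List.pyGetD r2
            (((PySem.List.index? r 1).getD 0 : Nat) : Int) 0) 0]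
      -- B's cols lookup equals the same column fold
      have hne : grid.map (fun r => (r.length : Int)) ≠ [] := by
        intro hcon
        exact absurd (List.mem_map_of_mem (f := fun r => (r.length : Int)) hr) (by simp [hcon])
      obtain ⟨m, hm⟩ : ∃ m, (grid.map (fun r => (r.length : Int))).min? = some m := by
        cases hmin : (grid.map (fun r => (r.length : Int))).min? with
        | none => exact absurd (List.min?_eq_none_iff.mp hmin) hne
        | some m => exact ⟨m, rfl⟩
      have hmlt : ((r.idxOf 1 : Nat) : Int) < ((grid.map (fun r => (r.length : Int))).min?).getD 0 := by
        rw [hm, Option.getD_some]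
        obtain ⟨r2, hr2, hr2e⟩ := List.mem_map.mp (List.min?_mem hm)
        have h2l := hlen r2 hr2
        have hr2e' : (r2.length : Int) = m := hr2e
        omega
      rw [PySem.List.pyGetD_map_pyRange_of_nonneg
          (fun j => (grid.map (fun row => PySem.List.pyGetD row j 0)).sum)
          _ _ 0 (Int.natCast_nonneg _) (by rw [hidx]; simpa using hmlt)]
      have hsum : (grid.map (fun row => PySem.List.pyGetD row
            (((PySem.List.index? r 1).getD 0 : Nat) : Int) 0)).sum
          = grid.foldl (fun a row => a + PySem.List.pyGetD row
            (((PySem.List.index? r 1).getD 0 : Nat) : Int) 0) 0 := by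
        rw [List.sum_eq_foldl, List.foldl_map]
      rw [hsum]
      simp only [if_pos h2]
      by_cases h3 :
          grid.foldl (fun a row => a + PySem.List.pyGetD row
            (((PySem.List.index? r 1).getD 0 : Nat) : Int) 0) 0 > 1
      · rw [if_pos h3, if_pos ⟨h2, h3⟩]
      · rw [if_neg h3, if_neg (fun hc => h3 hc.2)]
    · simp only [if_neg h2]
      split_ifs with hc
      · exact absurd hc.1 h2
      · rfl
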